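-- pv_equiv track=rewrite | github.com/LensPlaysGames/markdown2tex | main.py | parse_trailing_backslash
-- ===== SOURCE A (Python) =====
-- def parse_trailing_backslash(src):
--     lines = src.split('\n')
--     for i in range(len(lines)):
--         # Minimum length: " \"
--         if len(lines[i]) < 2:
--             continue
--
--         if lines[i].endswith(" \\"):
--             lines[i] = lines[i][:-2] + '\n\n'
--
--     return '\n'.join(lines)
-- ===== SOURCE B (Python) =====
-- def parse_trailing_backslash(src):
--     out = src.replace(' \\\n', '\n\n\n')
--     if src.endswith(' \\'):
--         out = out[:-2] + '\n\n'
--     return out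
-- ===== Notes on version B (the rewrite author's own statement) =====
-- stated objective: simpler
-- what changed: A splits the text into a list of lines, loops over indices rewriting each line that ends with space-backslash, and joins the list back; B keeps no line list at all: one str.replace of the three-char infix (space, backslash, newline) by three newlines, plus a single end-of-string fixup for a trailing space-backslash.
import Mathlib
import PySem

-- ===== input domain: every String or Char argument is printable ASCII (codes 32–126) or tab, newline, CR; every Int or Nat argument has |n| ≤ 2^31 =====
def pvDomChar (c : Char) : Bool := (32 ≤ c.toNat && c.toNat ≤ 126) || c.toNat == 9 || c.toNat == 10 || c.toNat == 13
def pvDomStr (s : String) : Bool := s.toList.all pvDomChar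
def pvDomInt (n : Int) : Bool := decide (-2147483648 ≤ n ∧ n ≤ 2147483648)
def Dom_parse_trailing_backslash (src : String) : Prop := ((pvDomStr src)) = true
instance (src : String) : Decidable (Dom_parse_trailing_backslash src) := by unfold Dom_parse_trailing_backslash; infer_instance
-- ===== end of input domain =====

-- B replaces the split/index-loop/join of A by a single scan: one str.replace of the
-- infix " \\\n" plus one end-of-string fixup (objective: simpler; no list of lines kept).

-- ===== PORT A =====
def parse_trailing_backslash (src : String) : String :=
  let lines := (PySem.Str.split? src "\n").getD []
  let lines := (PySem.List.pyRange 0 lines.length 1).foldl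
    (fun ls i =>
      let line := PySem.List.pyGetD ls i ""
      if PySem.Str.len line < 2 then ls
      else if PySem.Str.endswith line " \\" then
        ls.set i.toNat (PySem.Str.slice line none (some (-2)) ++ "\n\n")
      else ls) lines
  PySem.Str.join "\n" lines

-- ===== PORT B =====
def parse_trailing_backslash_alt (src : String) : String :=
  let out := PySem.Str.replace src " \\\n" "\n\n\n"
  if PySem.Str.endswith src " \\" then
    PySem.Str.slice out none (some (-2)) ++ "\n\n"
  else out

-- ===== PRECONDITION & SPEC =====
def Spec_parse_trailing_backslash (src : String) (out : String) : Prop := out = parse_trailing_backslash_alt src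
instance (src : String) (out : String) : Decidable (Spec_parse_trailing_backslash src out) := by unfold Spec_parse_trailing_backslash; infer_instance

-- ===== CLAIM (what is proved, stated in full; the proofs are below) =====
def Claim_equal_parse_trailing_backslash : Prop := ∀ (src : String), Dom_parse_trailing_backslash src → Spec_parse_trailing_backslash src (parse_trailing_backslash src)

-- ===== LEMMAS AND PROOFS =====

-- reference function: direct one-pass description of the transformation on char lists
def pvRef : List Char → List Char
  | ' ' :: '\\' :: '\n' :: t => '\n' :: '\n' :: '\n' :: pvRef t
  | [' ', '\\'] => ['\n', '\n']
  | c :: t => c :: pvRef t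
  | [] => []

-- structural version of Chars.replace with old = " \\\n", new = "\n\n\n"
def pvRep : List Char → List Char
  | ' ' :: '\\' :: '\n' :: t => '\n' :: '\n' :: '\n' :: pvRep t
  | [' ', '\\'] => [' ', '\\']
  | c :: t => c :: pvRep t
  | [] => []

-- structural version of Chars.splitOn with sep = "\n"
def pvSplit : List Char → List (List Char)
  | [] => [[]]
  | '\n' :: t => [] :: pvSplit t
  | c :: t =>
    match pvSplit t with
    | p :: ps => (c :: p) :: ps
    | [] => [[c]]

def pvPrepend (x : List Char) : List (List Char) → List (List Char)
  | p :: ps => (x ++ p) :: ps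
  | [] => [x]

-- per-line transform, char-list level
def pvG (l : List Char) : List Char :=
  if PySem.Chars.endswith l [' ', '\\'] then
    PySem.Chars.slice l none (some (-2)) ++ ['\n', '\n']
  else l

-- per-line transform, String level (what A's loop body does to line i)
def pvF (line : String) : String :=
  if PySem.Str.len line < 2 then line
  else if PySem.Str.endswith line " \\" then
    PySem.Str.slice line none (some (-2)) ++ "\n\n"
  else line

lemma pvSplit_ne_nil (cs : List Char) : pvSplit cs ≠ [] := by
  induction cs using pvSplit.induct with
  | case1 => simp [pvSplit]
  | case2 t ih => simp [pvSplit]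
  | case3 c t hne p ps hsp => simp [pvSplit, hsp]
  | case4 c t hne hsp => simp [pvSplit, hsp]

lemma pvPrepend_nil (ps : List (List Char)) (h : ps ≠ []) : pvPrepend [] ps = ps := by
  cases ps with
  | nil => exact absurd rfl h
  | cons p ps => simp [pvPrepend]

lemma pvPrepend_append (x y : List Char) (ps : List (List Char)) (h : ps ≠ []) :
    pvPrepend (x ++ y) ps = pvPrepend x (pvPrepend y ps) := by
  cases ps with
  | nil => exact absurd rfl h
  | cons p ps => simp [pvPrepend]

lemma pvSplit_cons (c : Char) (t : List Char) (hc : c ≠ '\n') :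
    pvSplit (c :: t) = pvPrepend [c] (pvSplit t) := by
  rw [pvSplit.eq_def]
  split
  · rename_i heq; exact absurd heq (by simp)
  · rename_i heq; exact absurd (List.cons_eq_cons.mp heq).1 hc
  · rename_i h1 h2
    obtain ⟨hc1, ht⟩ := List.cons_eq_cons.mp h2
    subst hc1 ht
    cases h : pvSplit t with
    | nil => simp [pvPrepend]
    | cons p ps => simp [pvPrepend]

lemma pvSplitOn_go (fuel : Nat) : ∀ (l cur : List Char) (accs : List (List Char)),
    l.length ≤ fuel →
    PySem.Chars.splitOn.go ['\n'] fuel l cur accs = accs.reverse ++ pvPrepend cur.reverse (pvSplit l) := by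
  induction fuel with
  | zero =>
    intro l cur accs hl
    have : l = [] := List.eq_nil_of_length_eq_zero (Nat.le_zero.mp hl)
    subst this
    simp [PySem.Chars.splitOn.go, pvSplit, pvPrepend]
  | succ n ih =>
    intro l cur accs hl
    cases l with
    | nil => simp [PySem.Chars.splitOn.go, pvSplit, pvPrepend]
    | cons c rest =>
      by_cases hc : c = '\n'
      · subst hc
        rw [PySem.Chars.splitOn.go]
        rw [if_pos (by simp [List.isPrefixOf])]
        rw [ih _ _ _ (by simpa using Nat.le_of_succ_le_succ (by simpa using hl))]
        simp only [pvSplit, pvPrepend, List.append_nil, List.reverse_cons, List.append_assoc,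
          List.cons_append, List.nil_append]
        cases h : pvSplit rest with
        | nil => exact absurd h (pvSplit_ne_nil rest)
        | cons p ps =>
          have hd : List.drop ['\n'].length ('\n' :: rest) = rest := by simp
          rw [hd, h]; simp
      · rw [PySem.Chars.splitOn.go]
        rw [if_neg (by simp [List.isPrefixOf]; intro h; exact hc h.symm)]
        rw [ih _ _ _ (by simpa using Nat.le_of_succ_le_succ (by simpa using hl))]
        rw [pvSplit_cons c rest hc, ← pvPrepend_append _ _ _ (pvSplit_ne_nil rest)]
        simp

lemma pvSplitOn_eq (cs : List Char) : PySem.Chars.splitOn cs ['\n'] = pvSplit cs := by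
  unfold PySem.Chars.splitOn
  rw [pvSplitOn_go (cs.length + 1) cs [] [] (Nat.le_succ _)]
  simp [pvPrepend_nil _ (pvSplit_ne_nil cs)]

-- characterization of pvSplit parts
lemma pvSplit_char : ∀ (t p : List Char) (ps : List (List Char)), pvSplit t = p :: ps →
    (ps = [] ∧ t = p) ∨ ∃ t', t = p ++ '\n' :: t' ∧ pvSplit t' = ps := by
  intro t
  induction t using pvSplit.induct with
  | case1 =>
    intro p ps h
    simp only [pvSplit, List.cons_eq_cons] at h
    obtain ⟨hp, hps⟩ := h
    exact Or.inl ⟨hps.symm, hp⟩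
  | case2 t ih =>
    intro p ps h
    simp only [pvSplit, List.cons_eq_cons] at h
    obtain ⟨hp, hps⟩ := h
    exact Or.inr ⟨t, by simp [← hp], hps⟩
  | case3 c t hne q qs hsp ih =>
    intro p ps h
    rw [pvSplit_cons c t (by simpa using hne), hsp] at h
    simp only [pvPrepend, List.cons_eq_cons] at h
    obtain ⟨hp, hps⟩ := h
    rcases ih q qs hsp with ⟨hqs, ht⟩ | ⟨t', ht, hqs'⟩
    · exact Or.inl ⟨hps.symm.trans hqs, by simp [← hp, ht]⟩
    · exact Or.inr ⟨t', by simp [← hp, ht], hps ▸ hqs'⟩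
  | case4 c t hne hsp => exact absurd hsp (pvSplit_ne_nil t)

-- endswith [a .. ' ', '\\'] peeling
lemma pvEndswith_cons (c : Char) (t : List Char) (h : c :: t ≠ [' ', '\\']) :
    PySem.Chars.endswith (c :: t) [' ', '\\'] = PySem.Chars.endswith t [' ', '\\'] := by
  rw [Bool.eq_iff_iff, PySem.Chars.endswith_iff, PySem.Chars.endswith_iff]
  constructor
  · intro hs
    rcases List.suffix_cons_iff.mp hs with heq | hs'
    · exact absurd heq.symm h
    · exact hs'
  · intro hs; exact hs.trans (List.suffix_cons c t)

lemma pvEndswith_ex {l : List Char} (h : PySem.Chars.endswith l [' ', '\\'] = true) :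
    ∃ u, l = u ++ [' ', '\\'] := by
  rw [PySem.Chars.endswith_iff] at h
  obtain ⟨u, hu⟩ := h
  exact ⟨u, hu.symm⟩

lemma pvSlice2 (u : List Char) (a b : Char) :
    PySem.List.slice (u ++ [a, b]) none (some (-2)) = u := by
  simp [PySem.List.slice, PySem.List.clampIdx]

lemma pvJoin_cons (x : List Char) (xs : List (List Char)) (h : xs ≠ []) :
    PySem.Chars.join ['\n'] (x :: xs) = x ++ '\n' :: PySem.Chars.join ['\n'] xs := by
  cases xs with
  | nil => exact absurd rfl h
  | cons y ys => simp [PySem.Chars.join, List.intercalate]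

lemma pvRef_cons (c : Char) (t : List Char)
    (h1 : ∀ t', c = ' ' → t = '\\' :: '\n' :: t' → False)
    (h2 : c = ' ' → t = ['\\'] → False) :
    pvRef (c :: t) = c :: pvRef t := by
  rw [pvRef.eq_def]
  split
  · rename_i heq
    obtain ⟨hc, ht⟩ := List.cons_eq_cons.mp heq
    rename_i t'
    exact (h1 t' hc ht).elim
  · rename_i heq
    obtain ⟨hc, ht⟩ := List.cons_eq_cons.mp heq
    exact (h2 hc ht).elim
  · rename_i h3 h4 heq
    obtain ⟨hc, ht⟩ := List.cons_eq_cons.mp heq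
    rw [hc, ht]
  · rename_i heq
    exact absurd heq (List.cons_ne_nil c t)

lemma pvRep_cons (c : Char) (t : List Char)
    (h1 : ∀ t', c = ' ' → t = '\\' :: '\n' :: t' → False)
    (h2 : c = ' ' → t = ['\\'] → False) :
    pvRep (c :: t) = c :: pvRep t := by
  rw [pvRep.eq_def]
  split
  · rename_i heq
    obtain ⟨hc, ht⟩ := List.cons_eq_cons.mp heq
    rename_i t'
    exact (h1 t' hc ht).elim
  · rename_i heq
    obtain ⟨hc, ht⟩ := List.cons_eq_cons.mp heq
    exact (h2 hc ht).elim
  · rename_i h3 h4 heq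
    obtain ⟨hc, ht⟩ := List.cons_eq_cons.mp heq
    rw [hc, ht]
  · rename_i heq
    exact absurd heq (List.cons_ne_nil c t)

lemma pvG_cons (c : Char) (p : List Char) (hcp : c :: p ≠ [' ', '\\']) :
    pvG (c :: p) = c :: pvG p := by
  unfold pvG
  rw [pvEndswith_cons c p hcp]
  cases hb : PySem.Chars.endswith p [' ', '\\'] with
  | false => simp
  | true =>
    obtain ⟨u, hu⟩ := pvEndswith_ex hb
    subst hu
    simp only [PySem.Chars.slice_eq_listSlice]
    rw [show (c :: (u ++ [' ', '\\'])) = (c :: u) ++ [' ', '\\'] by simp,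
      pvSlice2, pvSlice2]
    simp

-- A's join∘map∘split equals pvRef
lemma pvA_ref (cs : List Char) :
    PySem.Chars.join ['\n'] ((pvSplit cs).map pvG) = pvRef cs := by
  induction cs using pvRef.induct with
  | case1 t ih =>
    have hs : pvSplit (' ' :: '\\' :: '\n' :: t) = [' ', '\\'] :: pvSplit t := by
      rw [pvSplit_cons ' ' _ (by decide), pvSplit_cons '\\' _ (by decide)]
      simp only [pvSplit]
      cases h : pvSplit t with
      | nil => exact absurd h (pvSplit_ne_nil t)
      | cons p ps => simp [pvPrepend]
    rw [hs]
    simp only [List.map_cons]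
    rw [pvJoin_cons _ _ (by simp [pvSplit_ne_nil t])]
    rw [show pvG [' ', '\\'] = ['\n', '\n'] from by decide, ih]
    simp [pvRef]
  | case2 => decide
  | case3 c t h1 h2 ih =>
    rw [pvRef_cons c t h1 h2, ← ih]
    by_cases hc : c = '\n'
    · subst hc
      have hs : pvSplit ('\n' :: t) = [] :: pvSplit t := by simp [pvSplit]
      rw [hs]
      simp only [List.map_cons]
      rw [pvJoin_cons _ _ (by simp [pvSplit_ne_nil t])]
      rw [show pvG [] = [] from by decide]
      simp
    · cases hsp : pvSplit t with
      | nil => exact absurd hsp (pvSplit_ne_nil t)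
      | cons p ps =>
        have hcp : c :: p ≠ [' ', '\\'] := by
          intro heq
          obtain ⟨hc1, hp1⟩ := List.cons_eq_cons.mp heq
          rcases pvSplit_char t p ps hsp with ⟨hps, ht⟩ | ⟨t', ht, _⟩
          · exact h2 hc1 (by simp [ht, hp1])
          · exact h1 t' hc1 (by simp [ht, hp1])
        rw [pvSplit_cons c t hc, hsp]
        simp only [pvPrepend, List.singleton_append, List.map_cons]
        cases ps with
        | nil => simp [pvG_cons c p hcp]
        | cons q qs =>
          rw [pvJoin_cons _ _ (by simp), pvJoin_cons _ _ (by simp), pvG_cons c p hcp]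
          simp
  | case4 => decide

-- B's core: replace equals pvRep
lemma pvRep_cons' (c : Char) (t : List Char)
    (h1 : ∀ t', c = ' ' → t = '\\' :: '\n' :: t' → False) :
    pvRep (c :: t) = c :: pvRep t := by
  by_cases h2 : c = ' ' ∧ t = ['\\']
  · obtain ⟨hc, ht⟩ := h2
    subst hc ht
    decide
  · exact pvRep_cons c t h1 (fun hc ht => h2 ⟨hc, ht⟩)

lemma pvReplace_go (fuel : Nat) : ∀ (l acc : List Char), l.length ≤ fuel →
    PySem.Chars.replace.go [' ', '\\', '\n'] ['\n', '\n', '\n'] fuel l acc = acc.reverse ++ pvRep l := by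
  induction fuel with
  | zero =>
    intro l acc hl
    have : l = [] := List.eq_nil_of_length_eq_zero (Nat.le_zero.mp hl)
    subst this
    simp [PySem.Chars.replace.go, pvRep]
  | succ n ih =>
    intro l acc hl
    cases l with
    | nil => simp [PySem.Chars.replace.go, pvRep]
    | cons c rest =>
      rw [PySem.Chars.replace.go]
      by_cases hp : [' ', '\\', '\n'].isPrefixOf (c :: rest) = true
      · rw [if_pos hp]
        have hpre : [' ', '\\', '\n'] <+: c :: rest := List.isPrefixOf_iff_prefix.mp hp
        obtain ⟨t, ht⟩ := hpre
        have hck : c :: rest = ' ' :: '\\' :: '\n' :: t := by simpa using ht.symm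
        obtain ⟨hc1, hc2⟩ := List.cons_eq_cons.mp hck
        subst hc1 hc2
        have hd : List.drop [' ', '\\', '\n'].length (' ' :: '\\' :: '\n' :: t) = t := by simp
        rw [hd, ih t _ (by simp at hl ⊢; omega)]
        simp [pvRep]
      · rw [if_neg hp]
        rw [ih rest _ (by simp at hl ⊢; omega)]
        have : pvRep (c :: rest) = c :: pvRep rest := by
          refine pvRep_cons' c rest (fun t' hc ht => ?_)
          subst hc ht
          simp [List.isPrefixOf] at hp
        rw [this]
        simp

lemma pvReplace_eq (cs : List Char) :
    PySem.Chars.replace cs [' ', '\\', '\n'] ['\n', '\n', '\n'] = pvRep cs := by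
  unfold PySem.Chars.replace
  rw [if_neg (by decide)]
  rw [pvReplace_go cs.length cs [] (le_refl _)]
  simp

-- joint key lemma relating pvRep and pvRef through the trailing " \" test
lemma pvKey (cs : List Char) :
    (PySem.Chars.endswith cs [' ', '\\'] = false → pvRep cs = pvRef cs) ∧
    (PySem.Chars.endswith cs [' ', '\\'] = true →
      ∃ u, pvRep cs = u ++ [' ', '\\'] ∧ pvRef cs = u ++ ['\n', '\n']) := by
  induction cs using pvRef.induct with
  | case1 t ih =>
    have e : PySem.Chars.endswith (' ' :: '\\' :: '\n' :: t) [' ', '\\'] =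
        PySem.Chars.endswith t [' ', '\\'] := by
      rw [pvEndswith_cons _ _ (by simp), pvEndswith_cons _ _ (by simp),
        pvEndswith_cons _ _ (by simp)]
    constructor
    · intro h
      rw [e] at h
      simp only [pvRep, pvRef]
      rw [ih.1 h]
    · intro h
      rw [e] at h
      obtain ⟨u, hu1, hu2⟩ := ih.2 h
      exact ⟨'\n' :: '\n' :: '\n' :: u, by simp [pvRep, hu1], by simp [pvRef, hu2]⟩
  | case2 =>
    constructor
    · intro h; exact absurd h (by decide)
    · intro _; exact ⟨[], by decide, by decide⟩
  | case3 c t h1 h2 ih =>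
    have hne : c :: t ≠ [' ', '\\'] := by
      intro heq
      obtain ⟨hc, ht⟩ := List.cons_eq_cons.mp heq
      exact h2 hc ht
    have e := pvEndswith_cons c t hne
    rw [pvRep_cons c t h1 h2, pvRef_cons c t h1 h2]
    constructor
    · intro h
      rw [e] at h
      rw [ih.1 h]
    · intro h
      rw [e] at h
      obtain ⟨u, hu1, hu2⟩ := ih.2 h
      exact ⟨c :: u, by simp [hu1], by simp [hu2]⟩
  | case4 =>
    constructor
    · intro _; rfl
    · intro h; exact absurd h (by decide)

lemma pvB_ref (src : String) : (parse_trailing_backslash_alt src).toList = pvRef src.toList := by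
  unfold parse_trailing_backslash_alt
  have hrep : (PySem.Str.replace src " \\\n" "\n\n\n").toList = pvRep src.toList := by
    rw [PySem.Str.toList_replace]
    rw [show (" \\\n" : String).toList = [' ', '\\', '\n'] from rfl,
      show ("\n\n\n" : String).toList = ['\n', '\n', '\n'] from rfl]
    exact pvReplace_eq src.toList
  rw [PySem.Str.endswith_eq, show (" \\" : String).toList = [' ', '\\'] from rfl]
  cases h : PySem.Chars.endswith src.toList [' ', '\\'] with
  | false =>
    simp only [Bool.false_eq_true, if_false]
    rw [hrep, (pvKey src.toList).1 h]
  | true =>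
    simp only [if_true]
    obtain ⟨u, hu1, hu2⟩ := (pvKey src.toList).2 h
    rw [String.toList_append, PySem.Str.toList_slice, PySem.Chars.slice_eq_listSlice,
      hrep, hu1, pvSlice2, hu2]
    rfl

lemma pvF_toList (l : String) : (pvF l).toList = pvG l.toList := by
  unfold pvF pvG
  rw [PySem.Str.endswith_eq, show (" \\" : String).toList = [' ', '\\'] from rfl]
  cases h : PySem.Chars.endswith l.toList [' ', '\\'] with
  | false =>
    simp only [Bool.false_eq_true, if_false]
    split <;> rfl
  | true =>
    obtain ⟨u, hu⟩ := pvEndswith_ex h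
    have hlen : ¬ PySem.Str.len l < 2 := by
      rw [PySem.Str.len_eq, hu]
      simp
      omega
    rw [if_neg hlen, if_pos rfl, if_pos rfl]
    rw [String.toList_append, PySem.Str.toList_slice, PySem.Chars.slice_eq_listSlice]
    rfl

lemma pvFoldl_set (post pre : List String) :
    (PySem.List.pyRange (pre.length) (pre.length + post.length) 1).foldl
      (fun ls i =>
        let line := PySem.List.pyGetD ls i ""
        if PySem.Str.len line < 2 then ls
        else if PySem.Str.endswith line " \\" then
          ls.set i.toNat (PySem.Str.slice line none (some (-2)) ++ "\n\n")
        else ls) (pre ++ post) = pre ++ post.map pvF := by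
  induction post generalizing pre with
  | nil =>
    rw [show ((pre.length : Int) + (([] : List String).length : Nat)) = (pre.length : Int) by simp]
    simp
  | cons x rest ih =>
    rw [PySem.List.pyRange_one_cons (by push_cast [List.length_cons]; omega)]
    rw [List.foldl_cons]
    have hget : PySem.List.pyGetD (pre ++ x :: rest) (pre.length : Int) "" = x := by
      rw [PySem.List.pyGetD_natCast]
      rw [List.getD_eq_getElem?_getD, List.getElem?_append_right (le_refl _)]
      simp
    have hset : ∀ v, (pre ++ x :: rest).set ((pre.length : Int)).toNat v = pre ++ v :: rest := by
      intro v
      rw [Int.toNat_natCast, List.set_append_right _ _ (le_refl _)]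
      simp
    have hstep :
        (let line := PySem.List.pyGetD (pre ++ x :: rest) ((pre.length : Nat) : Int) ""
          if PySem.Str.len line < 2 then pre ++ x :: rest
          else if PySem.Str.endswith line " \\" then
            (pre ++ x :: rest).set ((pre.length : Int)).toNat
              (PySem.Str.slice line none (some (-2)) ++ "\n\n")
          else pre ++ x :: rest) = (pre ++ [pvF x]) ++ rest := by
      simp only [hget, hset]
      unfold pvF
      split
      · simp
      · split <;> simp
    rw [hstep]
    have harg : ((pre.length : Int) + 1) = (((pre ++ [pvF x]).length : Nat) : Int) := by simp
    have harg2 : ((pre.length : Int) + (x :: rest).length) =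
        (((pre ++ [pvF x]).length : Nat) : Int) + rest.length := by simp; omega
    rw [harg, harg2, ih (pre ++ [pvF x])]
    simp

lemma pvA_ref' (src : String) : (parse_trailing_backslash src).toList = pvRef src.toList := by
  unfold parse_trailing_backslash
  have hsp := PySem.Str.split?_map src "\n"
  rw [show ("\n" : String).toList = ['\n'] from rfl] at hsp
  rw [show PySem.Chars.split? src.toList ['\n'] =
    some (PySem.Chars.splitOn src.toList ['\n']) from by simp [PySem.Chars.split?]] at hsp
  cases hLS : PySem.Str.split? src "\n" with
  | none => rw [hLS] at hsp; simp at hsp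
  | some LS =>
    rw [hLS] at hsp
    simp only [Option.map_some, Option.some.injEq] at hsp
    simp only [Option.getD_some]
    have hfold := pvFoldl_set LS []
    simp only [List.nil_append, List.length_nil, Nat.cast_zero, zero_add] at hfold
    rw [hfold]
    rw [PySem.Str.toList_join, show ("\n" : String).toList = ['\n'] from rfl]
    rw [List.map_map, show (String.toList ∘ pvF) = (fun l => pvG l.toList) from funext pvF_toList]
    rw [show (List.map (fun l => pvG l.toList) LS) = List.map pvG (List.map String.toList LS) from by
      rw [List.map_map]; rfl]
    rw [hsp, pvSplitOn_eq]
    exact pvA_ref src.toList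

-- ===== VERDICT (by name: the statement is the Claim_ definition above) =====
theorem parse_trailing_backslash_spec : Claim_equal_parse_trailing_backslash := by
  intro src _
  unfold Spec_parse_trailing_backslash
  rw [← String.toList_inj, pvA_ref', pvB_ref]
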